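-- pv_equiv track=rewrite | github.com/Zayitskin/aoc2020 | day 11/main.py | castingAdvance
-- ===== SOURCE A (Python) =====
-- def castingAdvance(data: list) -> list:
--     """Advance the Game of Life state one iteration using raycasts."""
--
--     #Create a new list to hold the advanced state
--     newSeats: list = []
--     #For each row...
--     for y in range(len(data)):
--         #Create a new string to hold the advanced row
--         newRow: str = ""
--         #For each character in the row...
--         for x in range(len(data[0])):
--             #If empty
--             if data[y][x] == ".":
--                 #Add empty to row
--                 newRow += "."
--
--             #If open
--             elif data[y][x] == "L":
--                 #If the cast doesn't hit any occupied seats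
--                 if cast((y, x), data) == 0:
--                     #Make occupied
--                     newRow += "#"
--                 else:
--                     #Otherwise, leave open
--                     newRow += "L"
--
--             #If occupied
--             elif data[y][x] == "#":
--                 #If the cast hits 5 or more
--                 if cast((y, x), data) >= 5:
--                     #Make open
--                     newRow += "L"
--                 else:
--                     #Otherwise, leave occupied
--                     newRow += "#"
--         #Add the row to the new list
--         newSeats.append(newRow)
--     #Return the new list
--     return newSeats
--
-- def cast(pos: tuple, data: list) -> int:
--
--     hits: int = 0
--     #For each direction...
--     for _dir in [[-1, -1],
--                  [-1, 0],
--                  [-1, 1],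
--                  [0, -1],
--                  [0, 1],
--                  [1, -1],
--                  [1, 0],
--                  [1, 1]]:
--         cy, cx = pos
--         while True:
--             #Advance once in the direction
--             cy -= _dir[0]
--             cx -= _dir[1]
--             #If out of bounds, stop
--             if cy < 0 or cx < 0 or cy >= len(data) or cx >= len(data[0]):
--                 break
--             #If an open seat, stop
--             if data[cy][cx] == "L":
--                 break
--             #If an occupied seat, count and stop
--             if data[cy][cx] == "#":
--                 hits += 1
--                 break
--     #Return the count
--     return hits
-- ===== SOURCE B (Python) =====
-- def castingAdvance(data: list) -> list:
--     """Advance the state one iteration: per-direction linear sweeps find the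
--     nearest visible seat for every cell at once, then the rules are applied."""
--
--     H = len(data)
--     if H == 0:
--         return []
--     W = len(data[0])
--     grid = [list(row[:W]) for row in data]
--
--     def seat(c):
--         return c == 'L' or c == '#'
--
--     def sweep_down(w, rows):
--         # nearest visible seat char (or None) in direction (-1, dx) for each cell,
--         # computed in one top-to-bottom pass carrying the previous row's answers
--         def go(dx):
--             prev_g = [None] * w
--             prev_n = [None] * w
--             res = []
--             for row in rows:
--                 cur = []
--                 for x in range(w):
--                     nx = x + dx
--                     if 0 <= nx < w:
--                         c = prev_g[nx]
--                         if c is None: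
--                             cur.append(None)
--                         elif seat(c):
--                             cur.append(c)
--                         else:
--                             cur.append(prev_n[nx])
--                     else:
--                         cur.append(None)
--                 res.append(cur)
--                 prev_g = list(row)
--                 prev_n = cur
--             return res
--         return go
--
--     def rev(g):
--         return g[::-1]
--
--     def transpose(w, g):
--         return [[row[j] for row in g] for j in range(w)]
--
--     tg = transpose(W, grid)
--     # near-seat grids, one per movement direction (order matches A's dir list)
--     nears = [
--         rev(sweep_down(W, rev(grid))(1)),                    # movement ( 1,  1)
--         rev(sweep_down(W, rev(grid))(0)),                    # movement ( 1,  0)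
--         rev(sweep_down(W, rev(grid))(-1)),                   # movement ( 1, -1)
--         transpose(H, rev(sweep_down(H, rev(tg))(0))),        # movement ( 0,  1)
--         transpose(H, sweep_down(H, tg)(0)),                  # movement ( 0, -1)
--         sweep_down(W, grid)(1),                              # movement (-1,  1)
--         sweep_down(W, grid)(0),                              # movement (-1,  0)
--         sweep_down(W, grid)(-1),                             # movement (-1, -1)
--     ]
--
--     out = []
--     for y in range(H):
--         row_chars = []
--         for x in range(W):
--             c = grid[y][x]
--             if c == '.':
--                 row_chars.append('.')
--             elif c == 'L' or c == '#':
--                 hits = sum(1 for n in nears if n[y][x] == '#')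
--                 if c == 'L':
--                     row_chars.append('#' if hits == 0 else 'L')
--                 else:
--                     row_chars.append('L' if hits >= 5 else '#')
--         out.append(''.join(row_chars))
--     return out
-- ===== Notes on version B (the rewrite author's own statement) =====
-- stated objective: alternative
-- what changed: Per-cell raycasts in 8 directions are replaced by eight whole-grid linear sweeps (one pass per direction, carrying the previous line's nearest-visible-seat answers, with reverse/transpose reductions), so each cell's occupied-neighbour count is assembled in O(1) lookups from precomputed tables.
import Mathlib
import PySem

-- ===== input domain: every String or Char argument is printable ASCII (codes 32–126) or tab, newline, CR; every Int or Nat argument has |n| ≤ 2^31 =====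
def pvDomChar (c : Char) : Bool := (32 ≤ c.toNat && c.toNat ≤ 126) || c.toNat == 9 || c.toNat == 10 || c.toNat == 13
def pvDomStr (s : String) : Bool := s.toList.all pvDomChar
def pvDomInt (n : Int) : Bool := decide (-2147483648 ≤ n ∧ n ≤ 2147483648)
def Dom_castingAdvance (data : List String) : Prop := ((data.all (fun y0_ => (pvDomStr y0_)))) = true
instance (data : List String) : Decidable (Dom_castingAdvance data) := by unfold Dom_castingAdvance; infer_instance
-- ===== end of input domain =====

-- B replaces A's per-cell 8-direction raycasts by eight whole-grid one-pass sweeps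
-- (reverse/transpose reductions to a single top-down sweep); equal return value on Pre_.

-- ===== PORT A =====
-- data[i][j]; every use is guarded in range by A's own bounds checks (and Pre_), so getD is exact here
def pvChrA (data : List String) (i j : Nat) : Char := (data.getD i "").toList.getD j ' '

-- the `while True` loop of `cast` for one direction; fuel recursion, the fuel
-- (H + W + 2 at every call site) strictly exceeds the number of possible steps
def castLoopA (data : List String) (W d0 d1 : Int) : Nat → Int → Int → Int
  | 0, _, _ => 0
  | fuel+1, cy, cx =>
    let cy' := cy - d0
    let cx' := cx - d1
    if cy' < 0 ∨ cx' < 0 ∨ (data.length : Int) ≤ cy' ∨ W ≤ cx' then 0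
    else
      let c := pvChrA data cy'.toNat cx'.toNat
      if c = 'L' then 0
      else if c = '#' then 1
      else castLoopA data W d0 d1 fuel cy' cx'

def castA (pos : Int × Int) (data : List String) : Int :=
  let W : Int := ((data.getD 0 "").toList.length : Int)
  [((-1:Int),(-1:Int)), (-1,0), (-1,1), (0,-1), (0,1), (1,-1), (1,0), (1,1)].foldl
    (fun hits d => hits + castLoopA data W d.1 d.2 (data.length + W.toNat + 2) pos.1 pos.2) 0

def castingAdvance (data : List String) : List String :=
  (List.range data.length).foldl (fun newSeats y =>
    let newRow := (List.range (data.getD 0 "").toList.length).foldl (fun row x =>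
      let c := pvChrA data y x
      if c = '.' then row ++ ['.']
      else if c = 'L' then
        (if castA ((y : Int), (x : Int)) data = 0 then row ++ ['#'] else row ++ ['L'])
      else if c = '#' then
        (if 5 ≤ castA ((y : Int), (x : Int)) data then row ++ ['L'] else row ++ ['#'])
      else row) []
    newSeats ++ [String.mk newRow]) []

-- ===== PORT B =====
def pvSeatB (c : Char) : Bool := c = 'L' || c = '#'

-- one output row of the sweep: nearest visible seat in direction (-1, dx),
-- computed from the previous row's characters pG and answers pN
def pvRowB (w : Nat) (dx : Int) (pG pN : List (Option Char)) : List (Option Char) :=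
  (List.range w).map (fun (x : Nat) =>
    let nx : Int := (x : Int) + dx
    if 0 ≤ nx ∧ nx < (w : Int) then
      match pG.getD nx.toNat none with
      | none => none
      | some c => if pvSeatB c then some c else pN.getD nx.toNat none
    else none)

def pvSweepAux (w : Nat) (dx : Int) (pG pN : List (Option Char)) :
    List (List Char) → List (List (Option Char))
  | [] => []
  | r :: rs =>
    let cur := pvRowB w dx pG pN
    cur :: pvSweepAux w dx (r.map some) cur rs

def pvSweep (w : Nat) (rows : List (List Char)) (dx : Int) : List (List (Option Char)) :=
  pvSweepAux w dx (List.replicate w none) (List.replicate w none) rows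

-- [[row[j] for row in g] for j in range(w)]; j is in range of every row at each use, so getD is exact
def pvTransp {α : Type} (d : α) (w : Nat) (g : List (List α)) : List (List α) :=
  (List.range w).map (fun j => g.map (fun row => row.getD j d))

def castingAdvance_alt (data : List String) : List String :=
  if data.length = 0 then []
  else
    let H := data.length
    let W := (data.getD 0 "").toList.length
    let grid : List (List Char) := data.map (fun r => r.toList.take W)
    let tg := pvTransp ' ' W grid
    -- near-seat grids, one per movement direction (order matches A's dir list)
    let nears : List (List (List (Option Char))) :=
      [ (pvSweep W grid.reverse 1).reverse,
        (pvSweep W grid.reverse 0).reverse,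
        (pvSweep W grid.reverse (-1)).reverse,
        pvTransp none H (pvSweep H tg.reverse 0).reverse,
        pvTransp none H (pvSweep H tg 0),
        pvSweep W grid 1,
        pvSweep W grid 0,
        pvSweep W grid (-1) ]
    (List.range H).foldl (fun out y =>
      let rowChars := (List.range W).foldl (fun rc x =>
        let c := (grid.getD y []).getD x ' '
        if c = '.' then rc ++ ['.']
        else if c = 'L' ∨ c = '#' then
          let hits : Int := nears.foldl
            (fun a n => a + (if (n.getD y []).getD x none = some '#' then 1 else 0)) 0
          if c = 'L' then (if hits = 0 then rc ++ ['#'] else rc ++ ['L'])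
          else (if 5 ≤ hits then rc ++ ['L'] else rc ++ ['#'])
        else rc) []
      out ++ [String.mk rowChars]) []

-- ===== PRECONDITION & SPEC =====
-- Pre_ excludes exactly the inputs on which A raises IndexError: some row shorter than row 0
-- (A reads data[y][x] for every x < len(data[0]) in every row y).
def Pre_castingAdvance (data : List String) : Prop :=
  ∀ r ∈ data, (data.headD "").toList.length ≤ r.toList.length
instance (data : List String) : Decidable (Pre_castingAdvance data) := by
  unfold Pre_castingAdvance; infer_instance

def pvWitness_castingAdvance : List String := ["#L", ".."]

def Spec_castingAdvance (data : List String) (out : List String) : Prop := out = castingAdvance_alt data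
instance (data : List String) (out : List String) : Decidable (Spec_castingAdvance data out) := by
  unfold Spec_castingAdvance; infer_instance

-- ===== CLAIM (what is proved, stated in full; the proofs are below) =====
def Claim_equal_castingAdvance : Prop := ∀ (data : List String), Dom_castingAdvance data →
  Pre_castingAdvance data → Spec_castingAdvance data (castingAdvance data)

-- ===== LEMMAS AND PROOFS =====

-- total 2-d access
def at2 {α : Type} (d : α) (g : List (List α)) (i j : Nat) : α := (g.getD i []).getD j d

-- specification shared by both sides: nearest visible seat from row y looking in direction (-1, dx)
def rayUp (w : Nat) (g : List (List Char)) (dx : Int) : Nat → Int → Option Char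
  | 0, _ => none
  | y+1, x =>
    let nx := x + dx
    if nx < 0 ∨ (w : Int) ≤ nx then none
    else
      let c := at2 ' ' g y nx.toNat
      if pvSeatB c then some c else rayUp w g dx y nx

def pvHit (o : Option Char) : Int := if o = some '#' then 1 else 0

def pgSpec (g : List (List Char)) (k j : Nat) : Option Char :=
  match k with | 0 => none | m+1 => some (at2 ' ' g m j)
def pnSpec (w : Nat) (g : List (List Char)) (dx : Int) (k j : Nat) : Option Char :=
  match k with | 0 => none | m+1 => rayUp w g dx m (j : Int)

lemma pvRowB_sound (w : Nat) (g : List (List Char)) (dx : Int) (k : Nat)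
    (pG pN : List (Option Char))
    (hG : ∀ j, j < w → pG.getD j none = pgSpec g k j)
    (hN : ∀ j, j < w → pN.getD j none = pnSpec w g dx k j) :
    ∀ x, x < w → (pvRowB w dx pG pN).getD x none = rayUp w g dx k x := by
  intro x hx
  unfold pvRowB
  simp only [List.getD_eq_getElem?_getD, List.getElem?_map, List.getElem?_range, hx,
    Option.map_some, Option.getD_some]
  by_cases hin : 0 ≤ (x : Int) + dx ∧ (x : Int) + dx < (w : Int)
  · obtain ⟨h0, h1⟩ := hin
    have hnxn : ((x : Int) + dx).toNat < w := by omega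
    have hcast : ((((x : Int) + dx).toNat : Nat) : Int) = (x : Int) + dx := Int.toNat_of_nonneg h0
    rw [if_pos ⟨h0, h1⟩, ← List.getD_eq_getElem?_getD, hG _ hnxn]
    cases k with
    | zero => simp [pgSpec, rayUp]
    | succ m =>
      simp only [pgSpec]
      rw [← List.getD_eq_getElem?_getD, hN _ hnxn]
      simp only [pnSpec, rayUp, hcast]
      rw [if_neg (show ¬((x : Int) + dx < 0 ∨ (w : Int) ≤ (x : Int) + dx) by omega)]
  · rw [if_neg hin]
    cases k with
    | zero => simp [rayUp]
    | succ m =>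
      simp only [rayUp]
      rw [if_pos (by omega)]

lemma sweepAux_len (w : Nat) (dx : Int) (pG pN : List (Option Char)) (rs : List (List Char)) :
    (pvSweepAux w dx pG pN rs).length = rs.length := by
  induction rs generalizing pG pN with
  | nil => rfl
  | cons r rs ih => simp [pvSweepAux, ih]

lemma sweepAux_sound (w : Nat) (g : List (List Char)) (dx : Int)
    (hg : ∀ r ∈ g, r.length = w) :
    ∀ (rs : List (List Char)) (k : Nat), g.drop k = rs →
    ∀ (pG pN : List (Option Char)),
      (∀ j, j < w → pG.getD j none = pgSpec g k j) →
      (∀ j, j < w → pN.getD j none = pnSpec w g dx k j) →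
    ∀ i x, i < rs.length → x < w →
      at2 none (pvSweepAux w dx pG pN rs) i x = rayUp w g dx (k+i) x := by
  intro rs
  induction rs with
  | nil => intro k _ pG pN _ _ i x hi; simp at hi
  | cons r rs ih =>
    intro k hk pG pN hG hN i x hi hx
    have hgr : g[k]? = some r := by
      have h0 : (g.drop k)[0]? = some r := by rw [hk]; rfl
      rw [List.getElem?_drop] at h0
      simpa using h0
    have hrg : r ∈ g := List.mem_of_getElem? hgr
    have hrw : r.length = w := hg r hrg
    cases i with
    | zero =>
      simp only [pvSweepAux, at2, List.getD_cons_zero, Nat.add_zero]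
      exact pvRowB_sound w g dx k pG pN hG hN x hx
    | succ i' =>
      simp only [pvSweepAux, at2, List.getD_cons_succ]
      have hdrop : g.drop (k+1) = rs := by
        have := congrArg (List.drop 1) hk
        simpa [List.drop_drop, Nat.add_comm] using this
      have hG' : ∀ j, j < w → (r.map some).getD j none = pgSpec g (k+1) j := by
        intro j hj
        have hjr : j < r.length := by omega
        simp [pgSpec, at2, List.getD_eq_getElem?_getD, List.getElem?_map,
          List.getElem?_eq_getElem hjr, hgr]
      have hN' : ∀ j, j < w → (pvRowB w dx pG pN).getD j none = pnSpec w g dx (k+1) j := by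
        intro j hj
        simpa [pnSpec] using pvRowB_sound w g dx k pG pN hG hN j hj
      have := ih (k+1) hdrop (r.map some) (pvRowB w dx pG pN) hG' hN' i' x (by simpa using hi) hx
      rw [show k + 1 + i' = k + (i' + 1) by omega] at this
      simpa only [at2] using this

lemma sweep_sound (w : Nat) (g : List (List Char)) (dx : Int)
    (hg : ∀ r ∈ g, r.length = w) :
    ∀ i x, i < g.length → x < w →
      at2 none (pvSweep w g dx) i x = rayUp w g dx i x := by
  intro i x hi hx
  have h := sweepAux_sound w g dx hg g 0 (by simp)
    (List.replicate w none) (List.replicate w none)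
    (fun j hj => by simp [pgSpec, List.getD_eq_getElem?_getD, List.getElem?_replicate, hj])
    (fun j hj => by simp [pnSpec, List.getD_eq_getElem?_getD, List.getElem?_replicate, hj])
    i x hi hx
  simpa [pvSweep] using h

lemma at2_reverse {α : Type} (d : α) (g : List (List α)) (i j : Nat) (h : i < g.length) :
    at2 d g.reverse i j = at2 d g (g.length - 1 - i) j := by
  simp [at2, List.getD_eq_getElem?_getD, List.getElem?_reverse, h,
    List.getElem?_eq_getElem (show g.length - 1 - i < g.length by omega)]

lemma at2_transp {α : Type} (d : α) (w : Nat) (g : List (List α)) (i j : Nat)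
    (hj : j < w) (hi : i < g.length) :
    at2 d (pvTransp d w g) j i = at2 d g i j := by
  simp [at2, pvTransp, List.getD_eq_getElem?_getD, List.getElem?_map, hj,
    List.getElem?_eq_getElem hi]

-- abbreviations for the derived quantities both ports share
def pvW (data : List String) : Nat := (data.getD 0 "").toList.length
def pvGrid (data : List String) : List (List Char) :=
  data.map (fun r => r.toList.take (pvW data))
def pvTg (data : List String) : List (List Char) := pvTransp ' ' (pvW data) (pvGrid data)

lemma grid_len (data : List String) : (pvGrid data).length = data.length := by simp [pvGrid]

lemma grid_rect (data : List String) (hpre : Pre_castingAdvance data) :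
    ∀ r ∈ pvGrid data, r.length = pvW data := by
  intro r hr
  simp only [pvGrid, List.mem_map] at hr
  obtain ⟨s, hs, rfl⟩ := hr
  have h := hpre s hs
  have hhd : data.headD "" = data.getD 0 "" := by cases data <;> rfl
  rw [hhd] at h
  simp only [List.length_take, pvW]
  omega

lemma tg_len (data : List String) : (pvTg data).length = pvW data := by
  simp [pvTg, pvTransp]

lemma tg_rect (data : List String) : ∀ r ∈ pvTg data, r.length = data.length := by
  intro r hr
  simp only [pvTg, pvTransp, List.mem_map] at hr
  obtain ⟨j, _, rfl⟩ := hr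
  simp [grid_len]

lemma chrA_eq (data : List String) (y j : Nat) (hj : j < pvW data) :
    pvChrA data y j = at2 ' ' (pvGrid data) y j := by
  unfold pvChrA at2 pvGrid
  by_cases hy : y < data.length
  · simp [List.getD_eq_getElem?_getD, List.getElem?_map, List.getElem?_eq_getElem hy,
      List.getElem?_take_of_lt hj]
  · have h1 : data.getD y "" = "" := by
      rw [List.getD_eq_getElem?_getD, List.getElem?_eq_none (by omega)]; rfl
    have h2 : (data.map (fun r => r.toList.take (pvW data))).getD y [] = [] := by
      rw [List.getD_eq_getElem?_getD, List.getElem?_eq_none (by simpa using hy)]; rfl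
    rw [h1, h2]; rfl

lemma at2_tg (data : List String) (i j : Nat) (hj : j < pvW data) (hi : i < data.length) :
    at2 ' ' (pvTg data) j i = at2 ' ' (pvGrid data) i j :=
  at2_transp ' ' (pvW data) (pvGrid data) i j hj (by simpa [grid_len] using hi)

-- A's loop for directions that move one row up per step (movement (-1, m1); A's _dir = (1, -m1))
lemma castLoop_up (data : List String) (m1 : Int) :
    ∀ (y : Nat) (x : Int) (fuel : Nat), y ≤ data.length → y + 1 ≤ fuel →
      castLoopA data ((pvW data : Int)) 1 (-m1) fuel (y : Int) x
        = pvHit (rayUp (pvW data) (pvGrid data) m1 y x) := by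
  intro y
  induction y with
  | zero =>
    intro x fuel _ hf
    obtain ⟨f, rfl⟩ : ∃ f, fuel = f + 1 := ⟨fuel - 1, by omega⟩
    simp only [castLoopA, rayUp]
    rw [if_pos (show ((0 : Nat) : Int) - 1 < 0 ∨ x - -m1 < 0 ∨
      (data.length : Int) ≤ ((0 : Nat) : Int) - 1 ∨ ((pvW data : Nat) : Int) ≤ x - -m1 by omega)]
    rfl
  | succ y ih =>
    intro x fuel hy hf
    obtain ⟨f, rfl⟩ : ∃ f, fuel = f + 1 := ⟨fuel - 1, by omega⟩
    simp only [castLoopA, rayUp]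
    by_cases hb : x + m1 < 0 ∨ ((pvW data : Nat) : Int) ≤ x + m1
    · rw [if_pos (show ((y + 1 : Nat) : Int) - 1 < 0 ∨ x - -m1 < 0 ∨
        (data.length : Int) ≤ ((y + 1 : Nat) : Int) - 1 ∨
        ((pvW data : Nat) : Int) ≤ x - -m1 by omega)]
      rw [if_pos (show x + m1 < 0 ∨ ((pvW data : Nat) : Int) ≤ x + m1 from hb)]
      rfl
    · rw [if_neg (show ¬(((y + 1 : Nat) : Int) - 1 < 0 ∨ x - -m1 < 0 ∨
        (data.length : Int) ≤ ((y + 1 : Nat) : Int) - 1 ∨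
        ((pvW data : Nat) : Int) ≤ x - -m1) by omega)]
      rw [if_neg (show ¬(x + m1 < 0 ∨ ((pvW data : Nat) : Int) ≤ x + m1) from hb)]
      have e1 : ((y + 1 : Nat) : Int) - 1 = (y : Int) := by push_cast; ring
      have e2 : x - -m1 = x + m1 := by ring
      simp only [e1, e2, Int.toNat_natCast,
        chrA_eq data y ((x + m1).toNat) (show (x + m1).toNat < pvW data by omega)]
      by_cases hL : at2 ' ' (pvGrid data) y (x + m1).toNat = 'L'
      · simp [hL, pvSeatB, pvHit]
      · by_cases hS : at2 ' ' (pvGrid data) y (x + m1).toNat = '#'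
        · simp [hS, pvSeatB, pvHit]
        · rw [if_neg hL, if_neg hS, if_neg (by simp [pvSeatB, hL, hS])]
          exact ih (x + m1) f (by omega) (by omega)

-- movement (1, m1) (A's _dir = (-1, -m1)): reduce to rayUp on the reversed grid
lemma castLoop_down (data : List String) (m1 : Int) :
    ∀ (k : Nat) (x : Int) (fuel : Nat), k < data.length → k + 1 ≤ fuel →
      castLoopA data ((pvW data : Int)) (-1) (-m1) fuel ((data.length : Int) - 1 - k) x
        = pvHit (rayUp (pvW data) (pvGrid data).reverse m1 k x) := by
  intro k
  induction k with
  | zero =>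
    intro x fuel hk hf
    obtain ⟨f, rfl⟩ : ∃ f, fuel = f + 1 := ⟨fuel - 1, by omega⟩
    simp only [castLoopA, rayUp]
    rw [if_pos (show (data.length : Int) - 1 - ((0 : Nat) : Int) - -1 < 0 ∨ x - -m1 < 0 ∨
      (data.length : Int) ≤ (data.length : Int) - 1 - ((0 : Nat) : Int) - -1 ∨
      ((pvW data : Nat) : Int) ≤ x - -m1 by omega)]
    rfl
  | succ k ih =>
    intro x fuel hk hf
    obtain ⟨f, rfl⟩ : ∃ f, fuel = f + 1 := ⟨fuel - 1, by omega⟩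
    simp only [castLoopA, rayUp]
    by_cases hb : x + m1 < 0 ∨ ((pvW data : Nat) : Int) ≤ x + m1
    · rw [if_pos (show (data.length : Int) - 1 - ((k + 1 : Nat) : Int) - -1 < 0 ∨
        x - -m1 < 0 ∨
        (data.length : Int) ≤ (data.length : Int) - 1 - ((k + 1 : Nat) : Int) - -1 ∨
        ((pvW data : Nat) : Int) ≤ x - -m1 by omega)]
      rw [if_pos (show x + m1 < 0 ∨ ((pvW data : Nat) : Int) ≤ x + m1 from hb)]
      rfl
    · rw [if_neg (show ¬((data.length : Int) - 1 - ((k + 1 : Nat) : Int) - -1 < 0 ∨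
        x - -m1 < 0 ∨
        (data.length : Int) ≤ (data.length : Int) - 1 - ((k + 1 : Nat) : Int) - -1 ∨
        ((pvW data : Nat) : Int) ≤ x - -m1) by omega)]
      rw [if_neg (show ¬(x + m1 < 0 ∨ ((pvW data : Nat) : Int) ≤ x + m1) from hb)]
      have e1 : (data.length : Int) - 1 - ((k + 1 : Nat) : Int) - -1
          = (data.length : Int) - 1 - (k : Int) := by push_cast; ring
      have e2 : x - -m1 = x + m1 := by ring
      have eidx : ((data.length : Int) - 1 - (k : Int)).toNat = data.length - 1 - k := by omega
      have erev : at2 ' ' (pvGrid data) (data.length - 1 - k) (x + m1).toNat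
          = at2 ' ' (pvGrid data).reverse k (x + m1).toNat := by
        rw [at2_reverse ' ' (pvGrid data) k _ (by rw [grid_len]; omega), grid_len]
      simp only [e1, e2, eidx,
        chrA_eq data (data.length - 1 - k) ((x + m1).toNat)
          (show (x + m1).toNat < pvW data by omega), erev]
      by_cases hL : at2 ' ' (pvGrid data).reverse k (x + m1).toNat = 'L'
      · simp [hL, pvSeatB, pvHit]
      · by_cases hS : at2 ' ' (pvGrid data).reverse k (x + m1).toNat = '#'
        · simp [hS, pvSeatB, pvHit]
        · rw [if_neg hL, if_neg hS, if_neg (by simp [pvSeatB, hL, hS])]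
          exact ih (x + m1) f (by omega) (by omega)

-- movement (0, -1) (A's _dir = (0, 1)): reduce to rayUp on the transposed grid
lemma castLoop_left (data : List String) :
    ∀ (x : Nat) (y : Int) (fuel : Nat), x ≤ pvW data → 0 ≤ y → y < (data.length : Int) →
      x + 1 ≤ fuel →
      castLoopA data ((pvW data : Int)) 0 1 fuel y (x : Int)
        = pvHit (rayUp data.length (pvTg data) 0 x y) := by
  intro x
  induction x with
  | zero =>
    intro y fuel _ hy0 hyH hf
    obtain ⟨f, rfl⟩ : ∃ f, fuel = f + 1 := ⟨fuel - 1, by omega⟩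
    simp only [castLoopA, rayUp]
    rw [if_pos (show y - 0 < 0 ∨ ((0 : Nat) : Int) - 1 < 0 ∨
      (data.length : Int) ≤ y - 0 ∨ ((pvW data : Nat) : Int) ≤ ((0 : Nat) : Int) - 1 by omega)]
    rfl
  | succ x ih =>
    intro y fuel hx hy0 hyH hf
    obtain ⟨f, rfl⟩ : ∃ f, fuel = f + 1 := ⟨fuel - 1, by omega⟩
    simp only [castLoopA, rayUp]
    rw [if_neg (show ¬(y - 0 < 0 ∨ ((x + 1 : Nat) : Int) - 1 < 0 ∨
      (data.length : Int) ≤ y - 0 ∨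
      ((pvW data : Nat) : Int) ≤ ((x + 1 : Nat) : Int) - 1) by omega)]
    rw [if_neg (show ¬(y + 0 < 0 ∨ ((data.length : Nat) : Int) ≤ y + 0) by omega)]
    have e1 : ((x + 1 : Nat) : Int) - 1 = (x : Int) := by push_cast; ring
    simp only [e1, sub_zero, add_zero, Int.toNat_natCast,
      chrA_eq data y.toNat x (show x < pvW data by omega),
      ← at2_tg data y.toNat x (show x < pvW data by omega) (show y.toNat < data.length by omega)]
    by_cases hL : at2 ' ' (pvTg data) x y.toNat = 'L'
    · simp [hL, pvSeatB, pvHit]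
    · by_cases hS : at2 ' ' (pvTg data) x y.toNat = '#'
      · simp [hS, pvSeatB, pvHit]
      · rw [if_neg hL, if_neg hS, if_neg (by simp [pvSeatB, hL, hS])]
        exact ih y f (by omega) hy0 hyH (by omega)

-- movement (0, 1) (A's _dir = (0, -1)): reduce to rayUp on the reversed transposed grid
lemma castLoop_right (data : List String) :
    ∀ (k : Nat) (y : Int) (fuel : Nat), k < pvW data → 0 ≤ y → y < (data.length : Int) →
      k + 1 ≤ fuel →
      castLoopA data ((pvW data : Int)) 0 (-1) fuel y ((pvW data : Int) - 1 - k)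
        = pvHit (rayUp data.length (pvTg data).reverse 0 k y) := by
  intro k
  induction k with
  | zero =>
    intro y fuel hk hy0 hyH hf
    obtain ⟨f, rfl⟩ : ∃ f, fuel = f + 1 := ⟨fuel - 1, by omega⟩
    simp only [castLoopA, rayUp]
    rw [if_pos (show y - 0 < 0 ∨ ((pvW data : Nat) : Int) - 1 - ((0 : Nat) : Int) - -1 < 0 ∨
      (data.length : Int) ≤ y - 0 ∨
      ((pvW data : Nat) : Int) ≤ ((pvW data : Nat) : Int) - 1 - ((0 : Nat) : Int) - -1 by omega)]
    rfl
  | succ k ih =>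
    intro y fuel hk hy0 hyH hf
    obtain ⟨f, rfl⟩ : ∃ f, fuel = f + 1 := ⟨fuel - 1, by omega⟩
    simp only [castLoopA, rayUp]
    rw [if_neg (show ¬(y - 0 < 0 ∨
      ((pvW data : Nat) : Int) - 1 - ((k + 1 : Nat) : Int) - -1 < 0 ∨
      (data.length : Int) ≤ y - 0 ∨
      ((pvW data : Nat) : Int) ≤ ((pvW data : Nat) : Int) - 1 - ((k + 1 : Nat) : Int) - -1)
      by omega)]
    rw [if_neg (show ¬(y + 0 < 0 ∨ ((data.length : Nat) : Int) ≤ y + 0) by omega)]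
    have e1 : ((pvW data : Nat) : Int) - 1 - ((k + 1 : Nat) : Int) - -1
        = ((pvW data : Nat) : Int) - 1 - (k : Int) := by push_cast; ring
    have eidx : (((pvW data : Nat) : Int) - 1 - (k : Int)).toNat = pvW data - 1 - k := by omega
    have erev : at2 ' ' (pvTg data) (pvW data - 1 - k) y.toNat
        = at2 ' ' (pvTg data).reverse k y.toNat := by
      rw [at2_reverse ' ' (pvTg data) k _ (by rw [tg_len]; omega), tg_len]
    simp only [e1, sub_zero, add_zero, eidx,
      chrA_eq data y.toNat (pvW data - 1 - k) (show pvW data - 1 - k < pvW data by omega),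
      ← at2_tg data y.toNat (pvW data - 1 - k) (show pvW data - 1 - k < pvW data by omega)
        (show y.toNat < data.length by omega), erev]
    by_cases hL : at2 ' ' (pvTg data).reverse k y.toNat = 'L'
    · simp [hL, pvSeatB, pvHit]
    · by_cases hS : at2 ' ' (pvTg data).reverse k y.toNat = '#'
      · simp [hS, pvSeatB, pvHit]
      · rw [if_neg hL, if_neg hS, if_neg (by simp [pvSeatB, hL, hS])]
        exact ih y f (by omega) hy0 hyH (by omega)

-- B-side lookups into the eight near grids, expressed through rayUp
lemma nearFwd_lookup (data : List String) (hpre : Pre_castingAdvance data) (dx : Int)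
    (y x : Nat) (hy : y < data.length) (hx : x < pvW data) :
    ((pvSweep (pvW data) (pvGrid data) dx).getD y []).getD x none
      = rayUp (pvW data) (pvGrid data) dx y x := by
  have h := sweep_sound (pvW data) (pvGrid data) dx (grid_rect data hpre) y x
    (by rw [grid_len]; omega) hx
  simpa [at2] using h

lemma nearRev_lookup (data : List String) (hpre : Pre_castingAdvance data) (dx : Int)
    (y x : Nat) (hy : y < data.length) (hx : x < pvW data) :
    (((pvSweep (pvW data) (pvGrid data).reverse dx).reverse.getD y []).getD x none)
      = rayUp (pvW data) (pvGrid data).reverse dx (data.length - 1 - y) x := by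
  have hlen : (pvSweep (pvW data) (pvGrid data).reverse dx).length = data.length := by
    simp [pvSweep, sweepAux_len, grid_len]
  have h1 : at2 none (pvSweep (pvW data) (pvGrid data).reverse dx).reverse y x
      = at2 none (pvSweep (pvW data) (pvGrid data).reverse dx) (data.length - 1 - y) x := by
    rw [at2_reverse none _ y x (by rw [hlen]; omega), hlen]
  have h2 := sweep_sound (pvW data) (pvGrid data).reverse dx
    (fun r hr => grid_rect data hpre r (List.mem_reverse.mp hr))
    (data.length - 1 - y) x (by rw [List.length_reverse, grid_len]; omega) hx
  simpa [at2] using h1.trans h2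

lemma nearTg_lookup (data : List String) (y x : Nat)
    (hy : y < data.length) (hx : x < pvW data) :
    ((pvTransp none data.length (pvSweep data.length (pvTg data) 0)).getD y []).getD x none
      = rayUp data.length (pvTg data) 0 x y := by
  have hlen : (pvSweep data.length (pvTg data) 0).length = pvW data := by
    simp [pvSweep, sweepAux_len, tg_len]
  have h1 : at2 none (pvTransp none data.length (pvSweep data.length (pvTg data) 0)) y x
      = at2 none (pvSweep data.length (pvTg data) 0) x y :=
    at2_transp none data.length _ x y hy (by rw [hlen]; omega)
  have h2 := sweep_sound data.length (pvTg data) 0 (tg_rect data) x y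
    (by rw [tg_len]; omega) hy
  simpa [at2] using h1.trans h2

lemma nearTgRev_lookup (data : List String) (y x : Nat)
    (hy : y < data.length) (hx : x < pvW data) :
    ((pvTransp none data.length
        (pvSweep data.length (pvTg data).reverse 0).reverse).getD y []).getD x none
      = rayUp data.length (pvTg data).reverse 0 (pvW data - 1 - x) y := by
  have hlen : (pvSweep data.length (pvTg data).reverse 0).length = pvW data := by
    simp [pvSweep, sweepAux_len, tg_len]
  have h1 : at2 none (pvTransp none data.length
        (pvSweep data.length (pvTg data).reverse 0).reverse) y x
      = at2 none (pvSweep data.length (pvTg data).reverse 0).reverse x y :=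
    at2_transp none data.length _ x y hy (by rw [List.length_reverse, hlen]; omega)
  have h2 : at2 none (pvSweep data.length (pvTg data).reverse 0).reverse x y
      = at2 none (pvSweep data.length (pvTg data).reverse 0) (pvW data - 1 - x) y := by
    rw [at2_reverse none _ x y (by rw [hlen]; omega), hlen]
  have h3 := sweep_sound data.length (pvTg data).reverse 0
    (fun r hr => tg_rect data r (List.mem_reverse.mp hr))
    (pvW data - 1 - x) y (by rw [List.length_reverse, tg_len]; omega) hy
  simpa [at2] using (h1.trans h2).trans h3

-- the raycast count of A equals B's count over the eight near grids
lemma cast_eq_hits (data : List String) (hpre : Pre_castingAdvance data) (y x : Nat)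
    (hy : y < data.length) (hx : x < pvW data) :
    castA ((y : Int), (x : Int)) data
      = List.foldl (fun a n => a + (if (n.getD y []).getD x none = some '#' then 1 else 0))
          (0 : Int)
          [ (pvSweep (pvW data) (pvGrid data).reverse 1).reverse,
            (pvSweep (pvW data) (pvGrid data).reverse 0).reverse,
            (pvSweep (pvW data) (pvGrid data).reverse (-1)).reverse,
            pvTransp none data.length (pvSweep data.length (pvTg data).reverse 0).reverse,
            pvTransp none data.length (pvSweep data.length (pvTg data) 0),
            pvSweep (pvW data) (pvGrid data) 1,
            pvSweep (pvW data) (pvGrid data) 0,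
            pvSweep (pvW data) (pvGrid data) (-1) ] := by
  simp only [castA, List.foldl_cons, List.foldl_nil]
  rw [show (data.getD 0 "").toList.length = pvW data from rfl]
  simp only [Int.toNat_natCast]
  have hcy : ((data.length : Int) - 1 - ((data.length - 1 - y : Nat) : Int)) = (y : Int) := by
    omega
  have hcx : ((pvW data : Int) - 1 - ((pvW data - 1 - x : Nat) : Int)) = (x : Int) := by
    omega
  have h1 := castLoop_down data 1 (data.length - 1 - y) (x : Int)
    (data.length + pvW data + 2) (by omega) (by omega)
  have h2 := castLoop_down data 0 (data.length - 1 - y) (x : Int)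
    (data.length + pvW data + 2) (by omega) (by omega)
  have h3 := castLoop_down data (-1) (data.length - 1 - y) (x : Int)
    (data.length + pvW data + 2) (by omega) (by omega)
  rw [hcy] at h1 h2 h3
  have h4 := castLoop_right data (pvW data - 1 - x) (y : Int)
    (data.length + pvW data + 2) (by omega) (by omega) (by omega) (by omega)
  rw [hcx] at h4
  have h5 := castLoop_left data x (y : Int)
    (data.length + pvW data + 2) (by omega) (by omega) (by omega) (by omega)
  have h6 := castLoop_up data 1 y (x : Int) (data.length + pvW data + 2) (by omega) (by omega)
  have h7 := castLoop_up data 0 y (x : Int) (data.length + pvW data + 2) (by omega) (by omega)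
  have h8 := castLoop_up data (-1) y (x : Int) (data.length + pvW data + 2) (by omega) (by omega)
  simp only [neg_neg, neg_zero] at h2 h3 h7 h8
  rw [h1, h2, h3, h4, h5, h6, h7, h8,
    nearRev_lookup data hpre 1 y x hy hx,
    nearRev_lookup data hpre 0 y x hy hx,
    nearRev_lookup data hpre (-1) y x hy hx,
    nearTgRev_lookup data y x hy hx,
    nearTg_lookup data y x hy hx,
    nearFwd_lookup data hpre 1 y x hy hx,
    nearFwd_lookup data hpre 0 y x hy hx,
    nearFwd_lookup data hpre (-1) y x hy hx]
  simp [pvHit]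

theorem castingAdvance_spec : Claim_equal_castingAdvance := by
  intro data _ hpre
  unfold Spec_castingAdvance
  by_cases hH : data.length = 0
  · have hnil : data = [] := List.length_eq_zero_iff.mp hH
    subst hnil; rfl
  · simp only [castingAdvance, castingAdvance_alt]
    rw [if_neg hH]
    rw [show (data.getD 0 "").toList.length = pvW data from rfl]
    rw [show data.map (fun r => r.toList.take (pvW data)) = pvGrid data from rfl]
    rw [show pvTransp ' ' (pvW data) (pvGrid data) = pvTg data from rfl]
    apply PySem.List.foldl_congr_mem
    intro acc y hy
    have hyH : y < data.length := List.mem_range.mp hy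
    have hrow : ∀ rowA rowB : List Char, rowA = rowB →
        acc ++ [String.mk rowA] = acc ++ [String.mk rowB] := by
      intro rowA rowB h; rw [h]
    apply hrow
    apply PySem.List.foldl_congr_mem
    intro rc x hx
    have hxW : x < pvW data := List.mem_range.mp hx
    rw [show ((pvGrid data).getD y []).getD x ' ' = at2 ' ' (pvGrid data) y x from rfl]
    simp only [chrA_eq data y x hxW]
    rw [← cast_eq_hits data hpre y x hyH hxW]
    by_cases hdot : at2 ' ' (pvGrid data) y x = '.'
    · simp [hdot]
    · by_cases hL : at2 ' ' (pvGrid data) y x = 'L'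
      · simp [hdot, hL]
      · by_cases hS : at2 ' ' (pvGrid data) y x = '#'
        · simp [hdot, hL, hS]
        · simp [hdot, hL, hS]
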